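-- pv_equiv track=rewrite | github.com/danieleschmidt/fast-vlm-ondevice-kit | progressive_quality_gates.py | _generate_research_recommendations
-- ===== SOURCE A (Python) =====
-- from typing import Dict, List, Any, Optional, Tuple
--
-- def _generate_research_recommendations(opportunities: List[str]) -> List[str]:
--     """Generate actionable research recommendations"""
--     recommendations = []
--
--     if any("algorithm" in o.lower() for o in opportunities):
--         recommendations.append("Prepare comparative study with established VLM baselines")
--
--     if any("performance" in o.lower() for o in opportunities):
--         recommendations.append("Design controlled experiments measuring inference latency vs accuracy")
--
--     if any("architectural" in o.lower() for o in opportunities):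
--         recommendations.append("Document novel architectural patterns for peer review")
--
--     recommendations.append("Create reproducible benchmark suite for academic validation")
--     recommendations.append("Prepare open-source dataset and evaluation metrics")
--
--     return recommendations
-- ===== SOURCE B (Python) =====
-- def _generate_research_recommendations(opportunities):
--     """Generate actionable research recommendations (single-pass keyword index)."""
--     keywords = ("algorithm", "performance", "architectural")
--     found = set()
--     for o in opportunities:
--         lo = o.lower()
--         for kw in keywords:
--             if kw in lo:
--                 found.add(kw)
--         if len(found) == 3:
--             break
--     recommendations = []
--     if "algorithm" in found:
--         recommendations.append("Prepare comparative study with established VLM baselines")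
--     if "performance" in found:
--         recommendations.append("Design controlled experiments measuring inference latency vs accuracy")
--     if "architectural" in found:
--         recommendations.append("Document novel architectural patterns for peer review")
--     recommendations.append("Create reproducible benchmark suite for academic validation")
--     recommendations.append("Prepare open-source dataset and evaluation metrics")
--     return recommendations
-- ===== Notes on version B (the rewrite author's own statement) =====
-- stated objective: alternative
-- what changed: Replaces three separate any()-scans of the whole list by one pass that builds a set of found keywords (breaking early once all three are present), followed by an emission phase driven by set membership.
import Mathlib
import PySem

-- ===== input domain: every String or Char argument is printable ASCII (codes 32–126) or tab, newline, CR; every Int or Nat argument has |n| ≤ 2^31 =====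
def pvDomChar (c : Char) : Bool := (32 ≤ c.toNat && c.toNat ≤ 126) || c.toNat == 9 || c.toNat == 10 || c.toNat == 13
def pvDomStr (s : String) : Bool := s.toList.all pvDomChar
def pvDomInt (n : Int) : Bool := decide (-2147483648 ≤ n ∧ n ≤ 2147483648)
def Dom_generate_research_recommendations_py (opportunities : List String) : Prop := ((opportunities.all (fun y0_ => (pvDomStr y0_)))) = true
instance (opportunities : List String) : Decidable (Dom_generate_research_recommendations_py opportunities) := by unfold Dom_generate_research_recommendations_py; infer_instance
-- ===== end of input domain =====

-- ===== PORT A =====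
-- B replaces A's three separate any()-scans by one pass building a set of found keywords (early break), then an emission phase.
def generate_research_recommendations_py (opportunities : List String) : List String :=
  let recommendations : List String := []
  let recommendations :=
    if opportunities.any (fun o => PySem.Str.isIn "algorithm" (PySem.Str.lower o)) then
      recommendations ++ ["Prepare comparative study with established VLM baselines"] else recommendations
  let recommendations :=
    if opportunities.any (fun o => PySem.Str.isIn "performance" (PySem.Str.lower o)) then
      recommendations ++ ["Design controlled experiments measuring inference latency vs accuracy"] else recommendations
  let recommendations :=
    if opportunities.any (fun o => PySem.Str.isIn "architectural" (PySem.Str.lower o)) then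
      recommendations ++ ["Document novel architectural patterns for peer review"] else recommendations
  let recommendations := recommendations ++ ["Create reproducible benchmark suite for academic validation"]
  let recommendations := recommendations ++ ["Prepare open-source dataset and evaluation metrics"]
  recommendations

-- ===== PORT B =====
def pvKeywords : List String := ["algorithm", "performance", "architectural"]

-- the single scanning pass of Source B: add every keyword contained in o.lower() to `found`, break once all 3 are found
def pvScan : List String → PySem.Set String → PySem.Set String
  | [], found => found
  | o :: rest, found =>
    let lo := PySem.Str.lower o
    let found2 := pvKeywords.foldl (fun f kw => if PySem.Str.isIn kw lo then PySem.Set.add f kw else f) found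
    if found2.length = 3 then found2 else pvScan rest found2

def generate_research_recommendations_py_alt (opportunities : List String) : List String :=
  let found := pvScan opportunities PySem.Set.empty
  let recommendations : List String := []
  let recommendations :=
    if PySem.Set.contains found "algorithm" then
      recommendations ++ ["Prepare comparative study with established VLM baselines"] else recommendations
  let recommendations :=
    if PySem.Set.contains found "performance" then
      recommendations ++ ["Design controlled experiments measuring inference latency vs accuracy"] else recommendations
  let recommendations :=
    if PySem.Set.contains found "architectural" then
      recommendations ++ ["Document novel architectural patterns for peer review"] else recommendations
  let recommendations := recommendations ++ ["Create reproducible benchmark suite for academic validation"]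
  let recommendations := recommendations ++ ["Prepare open-source dataset and evaluation metrics"]
  recommendations

-- ===== PRECONDITION & SPEC =====
def Spec_generate_research_recommendations_py (opportunities : List String) (out : List String) : Prop := out = generate_research_recommendations_py_alt opportunities
instance (opportunities : List String) (out : List String) : Decidable (Spec_generate_research_recommendations_py opportunities out) := by unfold Spec_generate_research_recommendations_py; infer_instance

-- ===== CLAIM (what is proved, stated in full; the proofs are below) =====
def Claim_equal_generate_research_recommendations_py : Prop := ∀ (opportunities : List String), Dom_generate_research_recommendations_py opportunities → Spec_generate_research_recommendations_py opportunities (generate_research_recommendations_py opportunities)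

-- ===== LEMMAS AND PROOFS =====

-- membership after Source B's inner keyword loop (a fold of conditional Set.add over the keyword list)
lemma pvMem_foldl_addif (P : String → Bool) (kws : List String) (found : List String) (x : String) :
    x ∈ kws.foldl (fun f kw => if P kw then PySem.Set.add f kw else f) found ↔
      x ∈ found ∨ (x ∈ kws ∧ P x = true) := by
  induction kws generalizing found with
  | nil => simp
  | cons kw rest ih =>
    simp only [List.foldl_cons, ih]
    by_cases hx : x = kw
    · subst hx
      by_cases hP : P x = true <;> simp [hP, PySem.Set.mem_add]
    · by_cases hP : P kw = true
      · simp [hP, PySem.Set.mem_add, hx]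
      · simp [hP, hx]

lemma pvNodup_foldl_addif (P : String → Bool) (kws : List String) (found : List String)
    (h : found.Nodup) :
    (kws.foldl (fun f kw => if P kw then PySem.Set.add f kw else f) found).Nodup := by
  induction kws generalizing found with
  | nil => exact h
  | cons kw rest ih =>
    simp only [List.foldl_cons]
    apply ih
    split
    · exact PySem.Set.nodup_add found kw h
    · exact h

-- invariant of the scanning pass: membership in the result is "already found, or some remaining o contains it"
lemma pvScan_mem (opportunities : List String) (found : PySem.Set String)
    (hnd : found.Nodup) (hsub : ∀ y ∈ found, y ∈ pvKeywords) (x : String) (hx : x ∈ pvKeywords) :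
    x ∈ pvScan opportunities found ↔
      x ∈ found ∨ opportunities.any (fun o => PySem.Str.isIn x (PySem.Str.lower o)) = true := by
  induction opportunities generalizing found with
  | nil => simp [pvScan]
  | cons o rest ih =>
    simp only [pvScan]
    set found2 := pvKeywords.foldl
      (fun f kw => if PySem.Str.isIn kw (PySem.Str.lower o) then PySem.Set.add f kw else f) found with hf2
    have hmem : ∀ y, y ∈ found2 ↔ y ∈ found ∨ (y ∈ pvKeywords ∧ PySem.Str.isIn y (PySem.Str.lower o) = true) :=
      fun y => pvMem_foldl_addif (fun kw => PySem.Str.isIn kw (PySem.Str.lower o)) pvKeywords found y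
    have hnd2 : found2.Nodup :=
      pvNodup_foldl_addif (fun kw => PySem.Str.isIn kw (PySem.Str.lower o)) pvKeywords found hnd
    have hsub2 : ∀ y ∈ found2, y ∈ pvKeywords := by
      intro y hy
      rcases (hmem y).1 hy with h | ⟨h, _⟩
      · exact hsub y h
      · exact h
    by_cases hlen : found2.length = 3
    · rw [if_pos hlen]
      have hperm : found2.Perm pvKeywords :=
        (hnd2.subperm hsub2).perm_of_length_le (by simp [pvKeywords, hlen])
      have hxin : x ∈ found2 := hperm.mem_iff.2 hx
      refine ⟨fun _ => ?_, fun _ => hxin⟩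
      rcases (hmem x).1 hxin with h | ⟨_, h⟩
      · exact Or.inl h
      · refine Or.inr ?_
        simp only [List.any_cons, Bool.or_eq_true]
        exact Or.inl h
    · rw [if_neg hlen, ih found2 hnd2 hsub2, hmem x]
      simp only [List.any_cons, Bool.or_eq_true]
      constructor
      · rintro ((h | ⟨_, h⟩) | h)
        · exact Or.inl h
        · exact Or.inr (Or.inl h)
        · exact Or.inr (Or.inr h)
      · rintro (h | h | h)
        · exact Or.inl (Or.inl h)
        · exact Or.inl (Or.inr ⟨hx, h⟩)
        · exact Or.inr h

lemma pvScan_contains (opportunities : List String) (x : String) (hx : x ∈ pvKeywords) :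
    PySem.Set.contains (pvScan opportunities PySem.Set.empty) x =
      opportunities.any (fun o => PySem.Str.isIn x (PySem.Str.lower o)) := by
  have h := pvScan_mem opportunities PySem.Set.empty List.nodup_nil (by intro y hy; cases hy) x hx
  cases ha : opportunities.any (fun o => PySem.Str.isIn x (PySem.Str.lower o)) with
  | true => exact (PySem.Set.contains_iff _ _).2 (h.2 (Or.inr ha))
  | false =>
    cases hcb : PySem.Set.contains (pvScan opportunities PySem.Set.empty) x with
    | false => rfl
    | true =>
      have hm := (PySem.Set.contains_iff _ _).1 hcb
      rcases h.1 hm with hm0 | hany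
      · cases hm0
      · rw [ha] at hany
        exact absurd hany (by simp)

-- ===== VERDICT (by name: the statement is the Claim_ definition above) =====
theorem generate_research_recommendations_py_spec : Claim_equal_generate_research_recommendations_py := by
  intro opportunities _
  unfold Spec_generate_research_recommendations_py
  simp only [generate_research_recommendations_py, generate_research_recommendations_py_alt,
    pvScan_contains _ "algorithm" (by simp [pvKeywords]),
    pvScan_contains _ "performance" (by simp [pvKeywords]),
    pvScan_contains _ "architectural" (by simp [pvKeywords])]
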